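-- pv_equiv track=rewrite | github.com/satoyamanai/Labs_Python | homeworklab/homework4.4.py | find_losing_child
-- ===== SOURCE A (Python) =====
-- def find_losing_child(n, m):
--     current_cubes = m
--     current_player = 1
--
--     while True:
--         cubes_to_take = 2 ** (current_player - 1)
--
--         if cubes_to_take > 25:
--             cubes_to_take = 25
--
--         if cubes_to_take > current_cubes:
--             return current_player
--
--         current_player = (current_player % n) + 1
--         current_cubes -= cubes_to_take
-- ===== SOURCE B (Python) =====
-- def find_losing_child(n, m):
--     # Closed-form: skip whole rounds with one modulo, then resolve the residue.
--     if m < 1: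
--         return 1
--     if n >= 6:
--         cycle = 31 + 25 * (n - 5)   # 1+2+4+8+16 plus 25 for players 6..n
--     else:
--         cycle = (1 << n) - 1        # 1+2+...+2^(n-1)
--     c = m % cycle
--     for p in range(1, min(n, 6)):
--         t = 1 << (p - 1)
--         if t > c:
--             return p
--         c -= t
--     if n < 6:
--         return n
--     return 6 + c // 25
-- ===== Notes on version B (the rewrite author's own statement) =====
-- stated objective: faster
-- what changed: Replaces the step-by-step take-simulation (one loop iteration per turn) by a closed form: the per-round total is computed directly, whole rounds are skipped with one modulo, the first five players of the residual round are scanned, and the constant-take tail is resolved with one integer division.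
-- outside the precondition, e.g. on find_losing_child(-3, 5): A returns 0, B raises ValueError; on find_losing_child(0, 5): A raises ZeroDivisionError, B raises ZeroDivisionError
import Mathlib
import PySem

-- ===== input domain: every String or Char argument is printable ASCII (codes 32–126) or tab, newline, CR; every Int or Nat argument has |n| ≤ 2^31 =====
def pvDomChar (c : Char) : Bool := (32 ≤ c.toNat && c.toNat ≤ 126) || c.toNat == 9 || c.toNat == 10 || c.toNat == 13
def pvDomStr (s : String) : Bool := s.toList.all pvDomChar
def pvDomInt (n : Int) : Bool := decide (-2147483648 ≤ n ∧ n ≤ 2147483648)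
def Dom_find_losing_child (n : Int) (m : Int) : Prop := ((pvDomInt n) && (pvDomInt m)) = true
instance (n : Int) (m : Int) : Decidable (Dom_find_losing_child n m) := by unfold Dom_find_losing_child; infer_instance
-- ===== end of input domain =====

-- B replaces A's one-iteration-per-turn simulation by a closed form (whole rounds skipped by one
-- modulo, one residual round resolved by a 5-step scan plus an integer division): faster (asymptotic).

-- ===== PORT A =====
-- Python's `while True` loop, made total with fuel; under Pre_ each non-returning iteration
-- removes at least one cube, so fuel m.toNat + 1 is never exhausted.
-- `2 ** (current_player - 1)` is ported as `2 ^ (player - 1).toNat`, exact for player ≥ 1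
-- (the only values the loop reaches when n ≥ 1; Python yields a float for a negative exponent).
def findLosingLoop (n : Int) : Nat → Int → Int → Int
  | 0, _, _ => 0
  | fuel + 1, cubes, player =>
    let t0 : Int := 2 ^ (player - 1).toNat
    let t : Int := if t0 > 25 then 25 else t0
    if t > cubes then player
    else findLosingLoop n fuel (cubes - t) (PySem.Int.mod player n + 1)

def find_losing_child (n : Int) (m : Int) : Int :=
  findLosingLoop n (m.toNat + 1) m 1

-- ===== PORT B =====
-- `1 << k` for k ≥ 0 is ported as `2 ^ k.toNat` (exact for the non-negative shifts B performs).
def altLoop : List Int → Int → Sum Int Int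
  | [], c => .inr c
  | p :: ps, c =>
    let t : Int := 2 ^ (p - 1).toNat
    if t > c then .inl p else altLoop ps (c - t)

def find_losing_child_alt (n : Int) (m : Int) : Int :=
  if m < 1 then 1
  else
    let cycle : Int := if n ≥ 6 then 31 + 25 * (n - 5) else 2 ^ n.toNat - 1
    match altLoop (PySem.List.pyRange 1 (min n 6) 1) (PySem.Int.mod m cycle) with
    | .inl p => p
    | .inr c => if n < 6 then n else 6 + PySem.Int.floordiv c 25

-- ===== PRECONDITION & SPEC =====
-- Pre_ excludes n ≤ 0 with m ≥ 1: there A raises ZeroDivisionError (n = 0) or wanders into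
-- float exponents 2**(negative) and returns an accidental value (e.g. 0 at (-3, 5)), while B's
-- own algorithm raises (negative shift / modulo by zero) — a player count below 1 is not a
-- meaningful input to the game.
def Pre_find_losing_child (n : Int) (m : Int) : Prop := 1 ≤ n ∨ m < 1
instance (n : Int) (m : Int) : Decidable (Pre_find_losing_child n m) := by unfold Pre_find_losing_child; infer_instance
def pvWitness_find_losing_child : Int × Int := (3, 10)

def Spec_find_losing_child (n : Int) (m : Int) (out : Int) : Prop := out = find_losing_child_alt n m
instance (n : Int) (m : Int) (out : Int) : Decidable (Spec_find_losing_child n m out) := by unfold Spec_find_losing_child; infer_instance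

-- ===== CLAIM (what is proved, stated in full; the proofs are below) =====
def Claim_equal_find_losing_child : Prop := ∀ (n : Int) (m : Int), Dom_find_losing_child n m → Pre_find_losing_child n m → Spec_find_losing_child n m (find_losing_child n m)

-- ===== LEMMAS AND PROOFS =====

-- A's loop with the canonical (always sufficient) fuel.
def Lcan (n c p : Int) : Int := findLosingLoop n (c.toNat + 1) c p

-- the amount player p takes
def take (p : Int) : Int := min ((2 : Int) ^ (p - 1).toNat) 25

-- total taken by players p..n in one round (structural recursion on the player count)
def rsGo : Nat → Int → Int
  | 0, _ => 0
  | k + 1, p => take p + rsGo k (p + 1)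

def roundSum (n p : Int) : Int := rsGo ((n + 1 - p).toNat) p

lemma roundSum_unfold (n p : Int) :
    roundSum n p = if n < p then 0 else take p + roundSum n (p + 1) := by
  unfold roundSum
  by_cases h : n < p
  · rw [if_pos h, show (n + 1 - p).toNat = 0 by omega]
    rfl
  · rw [if_neg h, show (n + 1 - p).toNat = (n + 1 - (p + 1)).toNat + 1 by omega]
    rfl

lemma take_pos (p : Int) : 1 ≤ take p := by
  unfold take
  have : (1 : Int) ≤ 2 ^ (p - 1).toNat := one_le_pow₀ (by norm_num)
  omega

lemma take_of_ge_6 (p : Int) (hp : 6 ≤ p) : take p = 25 := by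
  unfold take
  have h5 : 5 ≤ (p - 1).toNat := by omega
  have : (2 : ℕ) ^ 5 ≤ 2 ^ (p - 1).toNat := Nat.pow_le_pow_right (by norm_num) h5
  have : ((2 : ℕ) ^ (p - 1).toNat : Int) ≥ 32 := by exact_mod_cast this
  push_cast at this
  omega

lemma take_one : take 1 = 1 := by decide
lemma take_two : take 2 = 2 := by decide
lemma take_three : take 3 = 4 := by decide
lemma take_four : take 4 = 8 := by decide
lemma take_five : take 5 = 16 := by decide

lemma rsGo_nonneg : ∀ k p, 0 ≤ rsGo k p := by
  intro k
  induction k with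
  | zero => intro p; simp [rsGo]
  | succ k ih =>
    intro p
    have h1 := take_pos p
    have h2 := ih (p + 1)
    simp only [rsGo]
    omega

lemma roundSum_nonneg (n p : Int) : 0 ≤ roundSum n p := rsGo_nonneg _ _

-- fuel irrelevance: any fuel above cubes.toNat gives the same answer
lemma fuel_irrel (n : Int) : ∀ f g (c p : Int), c.toNat < f → c.toNat < g →
    findLosingLoop n f c p = findLosingLoop n g c p := by
  intro f
  induction f with
  | zero => intro g c p hf _; omega
  | succ f ih =>
    intro g c p hf hg
    match g, hg with
    | g + 1, hg =>
      simp only [findLosingLoop]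
      set t : Int := if ((2:Int) ^ (p - 1).toNat) > 25 then 25 else (2:Int) ^ (p - 1).toNat with hT
      have ht : (1 : Int) ≤ t := by
        rw [hT]
        have : (1 : Int) ≤ 2 ^ (p - 1).toNat := one_le_pow₀ (by norm_num)
        split <;> omega
      by_cases hc : t > c
      · rw [if_pos hc, if_pos hc]
      · rw [if_neg hc, if_neg hc]
        exact ih g (c - t) _ (by omega) (by omega)

-- one unfolding of the canonical-fuel loop
lemma Lcan_step (n c p : Int) :
    Lcan n c p =
      if take p > c then p else Lcan n (c - take p) (PySem.Int.mod p n + 1) := by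
  unfold Lcan
  simp only [findLosingLoop]
  have htake : (if ((2:Int) ^ (p - 1).toNat) > 25 then 25 else (2:Int) ^ (p - 1).toNat) = take p := by
    unfold take
    have : (1 : Int) ≤ 2 ^ (p - 1).toNat := one_le_pow₀ (by norm_num)
    split <;> omega
  rw [htake]
  have h1 := take_pos p
  by_cases hc : take p > c
  · rw [if_pos hc, if_pos hc]
  · rw [if_neg hc, if_neg hc]
    exact fuel_irrel n c.toNat ((c - take p).toNat + 1) (c - take p)
      (PySem.Int.mod p n + 1) (by omega) (by omega)

-- walking the tail p..n of a round returns to player 1 with roundSum n p fewer cubes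
lemma walk (n : Int) (hn : 1 ≤ n) : ∀ k p c, 1 ≤ p → p ≤ n → (n - p).toNat = k →
    roundSum n p ≤ c → Lcan n c p = Lcan n (c - roundSum n p) 1 := by
  intro k
  induction k with
  | zero =>
    intro p c hp1 hpn hk hc
    have hpn' : p = n := by omega
    rw [hpn'] at hc ⊢
    have hts : roundSum n n = take n := by
      rw [roundSum_unfold, if_neg (by omega), roundSum_unfold, if_pos (by omega)]
      omega
    rw [hts] at hc ⊢
    rw [Lcan_step, if_neg (by omega)]
    have hmod : PySem.Int.mod n n = 0 := by
      rw [PySem.Int.mod_eq_emod_of_pos (by omega)]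
      simp
    rw [hmod]
    norm_num
  | succ k ih =>
    intro p c hp1 hpn hk hc
    have hplt : p < n := by omega
    have hts : roundSum n p = take p + roundSum n (p + 1) := by
      rw [roundSum_unfold, if_neg (by omega)]
    have h1 := take_pos p
    have h2 := roundSum_nonneg n (p + 1)
    rw [Lcan_step, if_neg (by omega)]
    have hmod : PySem.Int.mod p n = p := by
      rw [PySem.Int.mod_eq_emod_of_pos (by omega)]
      exact Int.emod_eq_of_lt (by omega) (by omega)
    rw [hmod]
    rw [ih (p + 1) (c - take p) (by omega) (by omega) (by omega) (by omega)]
    congr 1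
    omega

lemma roundSum_one_pos (n : Int) (hn : 1 ≤ n) : 1 ≤ roundSum n 1 := by
  rw [roundSum_unfold, if_neg (by omega)]
  have h1 := take_pos 1
  have h2 := roundSum_nonneg n (1 + 1)
  omega

-- skipping whole rounds: the answer only depends on m modulo one round's total
lemma lmod (n : Int) (hn : 1 ≤ n) : ∀ k c, c.toNat ≤ k → 0 ≤ c →
    Lcan n c 1 = Lcan n (c % roundSum n 1) 1 := by
  have hS := roundSum_one_pos n hn
  intro k
  induction k with
  | zero =>
    intro c hk hc
    rw [Int.emod_eq_of_lt (by omega) (by omega)]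
  | succ k ih =>
    intro c hk hc
    by_cases hlt : c < roundSum n 1
    · rw [Int.emod_eq_of_lt hc hlt]
    · rw [walk n hn (n - 1).toNat 1 c (by omega) (by omega) (by omega) (by omega)]
      rw [ih (c - roundSum n 1) (by omega) (by omega)]
      rw [Int.sub_emod_right]

-- one round's total for the constant-take players p ≥ 6
lemma roundSum25 (n : Int) : ∀ k p, 6 ≤ p → p ≤ n + 1 → (n + 1 - p).toNat = k →
    roundSum n p = 25 * (n + 1 - p) := by
  intro k
  induction k with
  | zero =>
    intro p hp6 hpn hk
    rw [roundSum_unfold, if_pos (by omega)]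
    omega
  | succ k ih =>
    intro p hp6 hpn hk
    rw [roundSum_unfold, if_neg (by omega), take_of_ge_6 p hp6,
        ih (p + 1) (by omega) (by omega) (by omega)]
    ring

lemma roundSum_formula (n : Int) (hn6 : 6 ≤ n) : roundSum n 1 = 31 + 25 * (n - 5) := by
  have h6 : roundSum n 6 = 25 * (n - 5) := by
    rw [roundSum25 n (n + 1 - 6).toNat 6 (by omega) (by omega) rfl]
    ring
  rw [roundSum_unfold, if_neg (by omega), take_one, show (1:Int) + 1 = 2 by norm_num,
      roundSum_unfold, if_neg (by omega), take_two, show (2:Int) + 1 = 3 by norm_num,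
      roundSum_unfold, if_neg (by omega), take_three, show (3:Int) + 1 = 4 by norm_num,
      roundSum_unfold, if_neg (by omega), take_four, show (4:Int) + 1 = 5 by norm_num,
      roundSum_unfold, if_neg (by omega), take_five, show (5:Int) + 1 = 6 by norm_num,
      h6]
  ring

-- constant-take tail of the residual round (players ≥ 6)
lemma s25 (n : Int) (hn : 6 ≤ n) : ∀ k p c, 6 ≤ p → p ≤ n → (n - p).toNat = k →
    0 ≤ c → c < 25 * (n + 1 - p) → Lcan n c p = p + c / 25 := by
  intro k
  induction k with
  | zero =>
    intro p c hp6 hpn hk h0 hlt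
    rw [Lcan_step, take_of_ge_6 p hp6, if_pos (by omega)]
    omega
  | succ k ih =>
    intro p c hp6 hpn hk h0 hlt
    rw [Lcan_step, take_of_ge_6 p hp6]
    by_cases hsm : (25 : Int) > c
    · rw [if_pos hsm]
      omega
    · rw [if_neg hsm]
      have hplt : p < n := by omega
      have hmod : PySem.Int.mod p n = p := by
        rw [PySem.Int.mod_eq_emod_of_pos (by omega)]
        exact Int.emod_eq_of_lt (by omega) (by omega)
      rw [hmod, ih (p + 1) (c - 25) (by omega) (by omega) (by omega) (by omega) (by omega)]
      omega

-- residual round, n ≥ 6: A's walk equals B's 5-step scan plus one division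
lemma res6 (n : Int) (hn : 6 ≤ n) (r : Int) (h0 : 0 ≤ r) (hr : r < 31 + 25 * (n - 5)) :
    Lcan n r 1 =
      (match altLoop (PySem.List.pyRange 1 6 1) r with
        | .inl p => p
        | .inr c => if n < 6 then n else 6 + PySem.Int.floordiv c 25) := by
  have hrange : PySem.List.pyRange 1 6 1 = [1, 2, 3, 4, 5] := by decide
  rw [hrange]
  have step : ∀ p c : Int, 1 ≤ p → p ≤ 5 →
      Lcan n c p = if take p > c then p else Lcan n (c - take p) (p + 1) := by
    intro p c h1lo h1hi
    rw [Lcan_step]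
    have hmod : PySem.Int.mod p n = p := by
      rw [PySem.Int.mod_eq_emod_of_pos (by omega)]
      exact Int.emod_eq_of_lt (by omega) (by omega)
    rw [hmod]
  have s1 : ∀ c : Int, Lcan n c 1 = if 1 > c then 1 else Lcan n (c - 1) 2 := by
    intro c; rw [step 1 c (by norm_num) (by norm_num), take_one]; norm_num
  have s2 : ∀ c : Int, Lcan n c 2 = if 2 > c then 2 else Lcan n (c - 2) 3 := by
    intro c; rw [step 2 c (by norm_num) (by norm_num), take_two]; norm_num
  have s3 : ∀ c : Int, Lcan n c 3 = if 4 > c then 3 else Lcan n (c - 4) 4 := by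
    intro c; rw [step 3 c (by norm_num) (by norm_num), take_three]; norm_num
  have s4 : ∀ c : Int, Lcan n c 4 = if 8 > c then 4 else Lcan n (c - 8) 5 := by
    intro c; rw [step 4 c (by norm_num) (by norm_num), take_four]; norm_num
  have s5 : ∀ c : Int, Lcan n c 5 = if 16 > c then 5 else Lcan n (c - 16) 6 := by
    intro c; rw [step 5 c (by norm_num) (by norm_num), take_five]; norm_num
  have e1 : ((2:Int) ^ (((1:Int)) - 1).toNat) = 1 := by decide
  have e2 : ((2:Int) ^ (((2:Int)) - 1).toNat) = 2 := by decide
  have e3 : ((2:Int) ^ (((3:Int)) - 1).toNat) = 4 := by decide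
  have e4 : ((2:Int) ^ (((4:Int)) - 1).toNat) = 8 := by decide
  have e5 : ((2:Int) ^ (((5:Int)) - 1).toNat) = 16 := by decide
  simp only [altLoop, e1, e2, e3, e4, e5]
  rw [s1]
  by_cases h1 : (1:Int) > r
  · rw [if_pos h1, if_pos h1]
  · rw [if_neg h1, if_neg h1, s2]
    by_cases h2 : (2:Int) > r - 1
    · rw [if_pos h2, if_pos h2]
    · rw [if_neg h2, if_neg h2, s3]
      by_cases h3 : (4:Int) > r - 1 - 2
      · rw [if_pos h3, if_pos h3]
      · rw [if_neg h3, if_neg h3, s4]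
        by_cases h4 : (8:Int) > r - 1 - 2 - 4
        · rw [if_pos h4, if_pos h4]
        · rw [if_neg h4, if_neg h4, s5]
          by_cases h5 : (16:Int) > r - 1 - 2 - 4 - 8
          · rw [if_pos h5, if_pos h5]
          · rw [if_neg h5, if_neg h5]
            rw [s25 n hn (n - 6).toNat 6 (r - 1 - 2 - 4 - 8 - 16) (by omega) (by omega)
                rfl (by omega) (by omega)]
            show 6 + (r - 1 - 2 - 4 - 8 - 16) / 25
              = if n < 6 then n else 6 + PySem.Int.floordiv (r - 1 - 2 - 4 - 8 - 16) 25
            rw [if_neg (show ¬ n < 6 by omega),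
                PySem.Int.floordiv_eq_ediv_of_pos (by norm_num : (0:Int) < 25)]

-- ===== VERDICT (by name: the statement is the Claim_ definition above) =====
theorem find_losing_child_spec : Claim_equal_find_losing_child := by
  intro n m _hdom hpre
  unfold Spec_find_losing_child
  by_cases hm : m < 1
  · -- first iteration already returns player 1; B returns 1 directly
    have hm0 : m.toNat = 0 := by omega
    unfold find_losing_child find_losing_child_alt
    rw [hm0, if_pos hm]
    simp only [findLosingLoop]
    rw [show ((2:Int) ^ (((1:Int)) - 1).toNat) = 1 by decide]
    norm_num
    omega
  · have hn : 1 ≤ n := hpre.resolve_right hm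
    have hS := roundSum_one_pos n hn
    have hfind : find_losing_child n m = Lcan n m 1 := rfl
    rw [hfind, lmod n hn m.toNat m (by omega) (by omega)]
    unfold find_losing_child_alt
    rw [if_neg hm]
    by_cases h6 : 6 ≤ n
    · have hcyc : (if n ≥ 6 then 31 + 25 * (n - 5) else 2 ^ n.toNat - 1) = roundSum n 1 := by
        rw [if_pos h6, roundSum_formula n h6]
      simp only [hcyc]
      rw [PySem.Int.mod_eq_emod_of_pos (show (0:Int) < roundSum n 1 by omega),
          show min n 6 = 6 by omega]
      have h0 : 0 ≤ m % roundSum n 1 := Int.emod_nonneg m (by omega)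
      have hlt : m % roundSum n 1 < roundSum n 1 := Int.emod_lt_of_pos m (by omega)
      exact res6 n h6 (m % roundSum n 1) h0
        (by have := roundSum_formula n h6; omega)
    · -- 1 ≤ n ≤ 5: the round total is at most 31; finish by cases on the residue
      have hcyc : (if n ≥ 6 then 31 + 25 * (n - 5) else 2 ^ n.toNat - 1) = roundSum n 1 := by
        rw [if_neg (by omega)]
        interval_cases n <;> decide
      simp only [hcyc]
      rw [PySem.Int.mod_eq_emod_of_pos (show (0:Int) < roundSum n 1 by omega)]
      have h0 : 0 ≤ m % roundSum n 1 := Int.emod_nonneg m (by omega)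
      have hlt : m % roundSum n 1 < roundSum n 1 := Int.emod_lt_of_pos m (by omega)
      set r := m % roundSum n 1 with hrdef
      clear_value r
      clear hrdef hfind hpre hm _hdom hS
      have hn5 : n ≤ 5 := by omega
      interval_cases n <;>
        · first
            | rw [show roundSum 1 1 = 1 from by decide] at hlt
            | rw [show roundSum 2 1 = 3 from by decide] at hlt
            | rw [show roundSum 3 1 = 7 from by decide] at hlt
            | rw [show roundSum 4 1 = 15 from by decide] at hlt
            | rw [show roundSum 5 1 = 31 from by decide] at hlt
          interval_cases r <;> decide
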